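-- pv_equiv track=rewrite | github.com/mrcotorobai/TrainedTransformers | trained_transformers/parity_transformer.py | parity_automaton
-- ===== SOURCE A (Python) =====
-- def parity_automaton(sequence):
--     state = 'even'  # Starting state
--     for char in sequence:
--         if state == 'even':
--             state = 'even' if char == '0' else 'odd'
--         elif state == 'odd':
--             state = 'odd' if char == '0' else 'even'
--     return state
-- ===== SOURCE B (Python) =====
-- def parity_automaton(sequence):
--     total = 0
--     for char in sequence:
--         if char != '0':
--             total += 1
--     return 'even' if total % 2 == 0 else 'odd'
-- ===== Notes on version B (the rewrite author's own statement) =====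
-- stated objective: simpler
-- what changed: B replaces the two-state even/odd string toggle with an integer count of the toggling characters and one closed-form parity decision after the loop.
import Mathlib
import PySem

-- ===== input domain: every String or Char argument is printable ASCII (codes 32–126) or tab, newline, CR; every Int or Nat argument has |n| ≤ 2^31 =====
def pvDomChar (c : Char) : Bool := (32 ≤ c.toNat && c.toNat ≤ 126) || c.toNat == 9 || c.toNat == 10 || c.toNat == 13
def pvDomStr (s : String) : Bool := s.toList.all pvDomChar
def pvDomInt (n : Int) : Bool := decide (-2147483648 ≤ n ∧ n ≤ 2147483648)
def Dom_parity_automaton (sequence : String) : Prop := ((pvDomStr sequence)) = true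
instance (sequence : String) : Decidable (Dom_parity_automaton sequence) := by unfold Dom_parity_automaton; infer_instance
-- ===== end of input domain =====

-- B replaces A's two-state even/odd string toggle with an integer count of non-'0' characters and one closed-form parity decision after the loop.

-- ===== PORT A =====
def parity_automaton (sequence : String) : String :=
  sequence.toList.foldl
    (fun state char =>
      if state == "even" then (if char == '0' then "even" else "odd")
      else if state == "odd" then (if char == '0' then "odd" else "even")
      else state)
    "even"

-- ===== PORT B =====
def parity_automaton_alt (sequence : String) : String :=
  let total : Int :=
    sequence.toList.foldl (fun total char => if char ≠ '0' then total + 1 else total) 0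
  if total % 2 == 0 then "even" else "odd"

-- ===== PRECONDITION & SPEC =====
def Spec_parity_automaton (sequence : String) (out : String) : Prop := out = parity_automaton_alt sequence
instance (sequence : String) (out : String) : Decidable (Spec_parity_automaton sequence out) := by unfold Spec_parity_automaton; infer_instance

-- ===== CLAIM (what is proved, stated in full; the proofs are below) =====
def Claim_equal_parity_automaton : Prop := ∀ (sequence : String), Dom_parity_automaton sequence → Spec_parity_automaton sequence (parity_automaton sequence)

-- ===== LEMMAS AND PROOFS =====

-- A's fold from state s equals B's count-fold from n, translated through parity.
theorem pv_fold_eq (l : List Char) (n : Int) :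
    l.foldl
      (fun state char =>
        if state == "even" then (if char == '0' then "even" else "odd")
        else if state == "odd" then (if char == '0' then "odd" else "even")
        else state)
      (if n % 2 == 0 then "even" else "odd")
    = (if (l.foldl (fun total char => if char ≠ '0' then total + 1 else total) n) % 2 == 0
       then "even" else "odd") := by
  induction l generalizing n with
  | nil => rfl
  | cons c cs ih =>
    simp only [List.foldl]
    by_cases h0 : c = '0'
    · subst h0
      by_cases hp : n % 2 = 0
      · simpa [hp] using ih n
      · simpa [hp] using ih n
    · have hne : (c == '0') = false := by simp [h0]
      by_cases hp : n % 2 = 0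
      · have hp1 : (n + 1) % 2 ≠ 0 := by omega
        simpa [hne, h0, hp, hp1] using ih (n + 1)
      · have hp1 : (n + 1) % 2 = 0 := by omega
        simpa [hne, h0, hp, hp1] using ih (n + 1)

-- ===== VERDICT (by name: the statement is the Claim_ definition above) =====
theorem parity_automaton_spec : Claim_equal_parity_automaton := by
  intro s _
  unfold Spec_parity_automaton parity_automaton parity_automaton_alt
  simpa using pv_fold_eq s.toList 0
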